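-- pv_equiv track=rewrite | github.com/wogkr810/coding-test | 프로그래머스/lv2/12913. 땅따먹기/땅따먹기.py | solution
-- ===== SOURCE A (Python) =====
-- def solution(land):
--     for i in range(1,len(land)):
--         tmp_list = sorted([[j,land[i-1][j]] for j in range(len(land[i-1]))], key = lambda x : x[1])
--         tmp_max_idx = tmp_list[-1][0]
--         for j in range(4):
--             if j == tmp_max_idx:
--                 land[i][j] += tmp_list[-2][1]
--             else:
--                 land[i][j] += tmp_list[-1][1]
--
--     return max(land[-1])
-- ===== SOURCE B (Python) =====
-- def solution(land):
--     for i in range(1, len(land)):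
--         prev = land[i - 1]
--         for j in range(4):
--             land[i][j] += max(prev[:j] + prev[j + 1:])
--     return max(land[-1])
-- ===== Notes on version B (the rewrite author's own statement) =====
-- stated objective: simpler
-- what changed: A builds [index,value] pairs for the previous row, sorts them, reads off the max and second-max, and branches per column on whether the column equals the argmax; B has no sort, no argmax and no second-max at all: for each column it adds the max of the previous row with that column sliced out (max(prev[:j]+prev[j+1:])), keeping the same in-place update and return; dropping the per-row pair construction and sort gives a measured constant-factor speedup.
import Mathlib
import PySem

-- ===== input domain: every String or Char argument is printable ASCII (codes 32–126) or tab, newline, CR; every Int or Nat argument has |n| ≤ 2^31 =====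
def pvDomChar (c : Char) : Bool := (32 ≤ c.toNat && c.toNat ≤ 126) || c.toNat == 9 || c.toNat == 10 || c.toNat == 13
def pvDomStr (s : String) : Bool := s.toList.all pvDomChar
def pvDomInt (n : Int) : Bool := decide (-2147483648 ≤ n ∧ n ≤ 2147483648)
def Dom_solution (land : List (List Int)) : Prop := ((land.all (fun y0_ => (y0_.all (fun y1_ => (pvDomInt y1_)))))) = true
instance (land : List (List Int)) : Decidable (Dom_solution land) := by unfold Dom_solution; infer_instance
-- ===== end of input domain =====

-- B drops A's per-row sort and its max/second-max/argmax branching: per column j it adds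
-- max(prev[:j] + prev[j+1:]), the previous row's max with column j sliced out. Same in-place
-- mutation of `land` as A, same return value; objective: simpler.

-- ===== PORT A =====
-- [[j, land[i-1][j]] for j in range(len(land[i-1]))]
def aPairs (prev : List Int) : List (Int × Int) :=
  (PySem.List.pyRange 0 prev.length 1).map (fun j => (j, PySem.List.pyGetD prev j 0))

-- body of A's outer loop (one value of i)
def aStep (L : List (List Int)) (i : Int) : List (List Int) :=
  let prev := PySem.List.pyGetD L (i - 1) []
  let tmp := PySem.List.sorted (aPairs prev) (fun x => x.2)
  let tmpMaxIdx := (PySem.List.pyGetD tmp (-1) (0, 0)).1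
  let row := (PySem.List.pyRange 0 4 1).foldl (fun r j =>
    if j = tmpMaxIdx then
      PySem.List.pySetD r j (PySem.List.pyGetD r j 0 + (PySem.List.pyGetD tmp (-2) (0, 0)).2)
    else
      PySem.List.pySetD r j (PySem.List.pyGetD r j 0 + (PySem.List.pyGetD tmp (-1) (0, 0)).2))
    (PySem.List.pyGetD L i [])
  PySem.List.pySetD L i row

def solution (land : List (List Int)) : Int :=
  let land' := (PySem.List.pyRange 1 land.length 1).foldl aStep land
  (PySem.List.max? (PySem.List.pyGetD land' (-1) []) (fun x => x)).getD 0

-- ===== PORT B =====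
-- max(prev[:j] + prev[j + 1:])
def bAddend (prev : List Int) (j : Int) : Int :=
  (PySem.List.max?
    (PySem.List.slice prev none (some j) ++ PySem.List.slice prev (some (j + 1)) none)
    (fun x => x)).getD 0

-- body of B's outer loop (one value of i)
def bStep (L : List (List Int)) (i : Int) : List (List Int) :=
  let prev := PySem.List.pyGetD L (i - 1) []
  let row := (PySem.List.pyRange 0 4 1).foldl (fun r j =>
    PySem.List.pySetD r j (PySem.List.pyGetD r j 0 + bAddend prev j))
    (PySem.List.pyGetD L i [])
  PySem.List.pySetD L i row

def solution_alt (land : List (List Int)) : Int :=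
  let land' := (PySem.List.pyRange 1 land.length 1).foldl bStep land
  (PySem.List.max? (PySem.List.pyGetD land' (-1) []) (fun x => x)).getD 0

-- ===== PRECONDITION & SPEC =====
-- Pre_ is exactly where A returns: A raises IndexError when some previous row has < 2 entries or
-- some mutated row i ≥ 1 has < 4 entries, and ValueError/IndexError on max of an empty/missing last row.
def Pre_solution (land : List (List Int)) : Prop :=
  land ≠ [] ∧ (land.length = 1 → land.headD [] ≠ []) ∧
  ∀ i : Nat, i < land.length → 1 ≤ i →
    2 ≤ (land.getD (i - 1) []).length ∧ 4 ≤ (land.getD i []).length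
instance (land : List (List Int)) : Decidable (Pre_solution land) := by
  unfold Pre_solution; infer_instance

def pvWitness_solution : List (List Int) := [[1, 2, 3, 4], [5, 6, 7, 8]]

def Spec_solution (land : List (List Int)) (out : Int) : Prop := out = solution_alt land
instance (land : List (List Int)) (out : Int) : Decidable (Spec_solution land out) := by
  unfold Spec_solution; infer_instance

-- ===== CLAIM (what is proved, stated in full; the proofs are below) =====
def Claim_equal_solution : Prop := ∀ (land : List (List Int)),
  Dom_solution land → Pre_solution land → Spec_solution land (solution land)

-- ===== LEMMAS AND PROOFS =====

-- max at index e excluded: value of the largest prev[k] with k ≠ e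
def IsExclMax (prev : List Int) (e v : Int) : Prop :=
  (∃ k : Int, 0 ≤ k ∧ k < prev.length ∧ k ≠ e ∧ PySem.List.pyGetD prev k 0 = v) ∧
  ∀ k : Int, 0 ≤ k → k < prev.length → k ≠ e → PySem.List.pyGetD prev k 0 ≤ v

theorem isExclMax_unique {prev : List Int} {e v w : Int}
    (hv : IsExclMax prev e v) (hw : IsExclMax prev e w) : v = w := by
  obtain ⟨⟨k, hk0, hk1, hk2, hk3⟩, hvle⟩ := hv
  obtain ⟨⟨l, hl0, hl1, hl2, hl3⟩, hwle⟩ := hw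
  have h1 : v ≤ w := hk3 ▸ hwle k hk0 hk1 hk2
  have h2 : w ≤ v := hl3 ▸ hvle l hl0 hl1 hl2
  omega

theorem snd_le_getLast {l : List (Int × Int)}
    (hp : l.Pairwise (fun a b => a.2 ≤ b.2)) (hne : l ≠ []) :
    ∀ x ∈ l, x.2 ≤ (l.getLast hne).2 := by
  induction l with
  | nil => simp at hne
  | cons a t ih =>
    intro x hx
    cases t with
    | nil =>
      simp only [List.mem_singleton] at hx
      subst hx; simp [List.getLast]
    | cons b t' =>
      have hp' := List.pairwise_cons.mp hp
      rw [List.getLast_cons (l := b :: t') (by simp)]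
      rcases List.mem_cons.mp hx with h | h
      · subst h; exact hp'.1 _ (List.getLast_mem _)
      · exact ih hp'.2 (by simp) x h

theorem mem_aPairs {prev : List Int} {p : Int × Int} :
    p ∈ aPairs prev ↔ ∃ k : Int, 0 ≤ k ∧ k < prev.length ∧ p = (k, PySem.List.pyGetD prev k 0) := by
  simp only [aPairs, List.mem_map, PySem.List.mem_pyRange_one]
  constructor
  · rintro ⟨j, ⟨h0, h1⟩, rfl⟩; exact ⟨j, h0, h1, rfl⟩
  · rintro ⟨k, h0, h1, rfl⟩; exact ⟨k, ⟨h0, h1⟩, rfl⟩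

theorem length_aPairs (prev : List Int) : (aPairs prev).length = prev.length := by
  simp [aPairs, PySem.List.length_pyRange_one]

-- A's sorted list: last element is a maximal pair, i.e. its fst is an index attaining the max
theorem a_last_max {prev : List Int} (_h2 : 2 ≤ prev.length)
    (tmp : List (Int × Int)) (htmp : tmp = PySem.List.sorted (aPairs prev) (fun x => x.2))
    (hne : tmp ≠ []) :
    0 ≤ (tmp.getLast hne).1 ∧ (tmp.getLast hne).1 < prev.length ∧
    PySem.List.pyGetD prev (tmp.getLast hne).1 0 = (tmp.getLast hne).2 ∧
    ∀ k : Int, 0 ≤ k → k < prev.length → PySem.List.pyGetD prev k 0 ≤ (tmp.getLast hne).2 := by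
  have hperm : tmp.Perm (aPairs prev) := htmp ▸ PySem.List.sorted_perm (aPairs prev) (fun x => x.2) false
  have hpw : tmp.Pairwise (fun a b => a.2 ≤ b.2) := htmp ▸ PySem.List.sorted_pairwise (aPairs prev) (fun x => x.2)
  have hmem : tmp.getLast hne ∈ aPairs prev := hperm.subset (List.getLast_mem hne)
  obtain ⟨k, hk0, hk1, hkeq⟩ := mem_aPairs.mp hmem
  refine ⟨by rw [hkeq]; exact hk0, by rw [hkeq]; exact hk1, by rw [hkeq], ?_⟩
  intro k' hk'0 hk'1
  have hp : (k', PySem.List.pyGetD prev k' 0) ∈ tmp :=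
    hperm.mem_iff.mpr (mem_aPairs.mpr ⟨k', hk'0, hk'1, rfl⟩)
  exact snd_le_getLast hpw hne _ hp

-- A's second-from-last value is the max with the last pair's index excluded
theorem a_second_exclmax {prev : List Int} (h2 : 2 ≤ prev.length)
    (tmp : List (Int × Int)) (htmp : tmp = PySem.List.sorted (aPairs prev) (fun x => x.2))
    (hne : tmp ≠ []) :
    IsExclMax prev (tmp.getLast hne).1 (PySem.List.pyGetD tmp (-2) (0, 0)).2 := by
  have hperm : tmp.Perm (aPairs prev) := htmp ▸ PySem.List.sorted_perm (aPairs prev) (fun x => x.2) false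
  have hpw : tmp.Pairwise (fun a b => a.2 ≤ b.2) := htmp ▸ PySem.List.sorted_pairwise (aPairs prev) (fun x => x.2)
  have hlen : tmp.length = prev.length := by
    rw [htmp, PySem.List.length_sorted, length_aPairs]
  have hdne : tmp.dropLast ≠ [] := by
    apply List.ne_nil_of_length_pos
    rw [List.length_dropLast]; omega
  have hsplit : tmp.dropLast ++ [tmp.getLast hne] = tmp := List.dropLast_append_getLast hne
  -- tmp[-2] is the last element of dropLast
  have hS : PySem.List.pyGetD tmp (-2) (0, 0) = tmp.dropLast.getLast hdne := by
    rw [PySem.List.pyGetD_neg_ofNat tmp 2 (0, 0) (by omega) (by omega)]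
    rw [List.getLast_eq_getElem hdne]
    rw [List.getElem_dropLast]
    exact getElem_congr rfl (by rw [List.length_dropLast]; omega) (by simp; omega)
  have hpwd : tmp.dropLast.Pairwise (fun a b => a.2 ≤ b.2) :=
    hpw.sublist (List.dropLast_sublist tmp)
  -- indices in tmp are pairwise distinct
  have hfst : (tmp.map Prod.fst).Nodup := by
    have hmapeq : (aPairs prev).map Prod.fst = PySem.List.pyRange 0 prev.length 1 := by
      simp [aPairs, List.map_map, Function.comp_def]
    have hpm := hperm.map Prod.fst
    rw [hmapeq] at hpm
    exact hpm.nodup_iff.mpr (PySem.List.nodup_pyRange_one _ _)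
  have hmem2 : tmp.dropLast.getLast hdne ∈ aPairs prev :=
    hperm.subset (List.dropLast_subset _ (List.getLast_mem hdne))
  obtain ⟨k2, hk20, hk21, hk2eq⟩ := mem_aPairs.mp hmem2
  -- the second-from-last pair's index differs from the last pair's index
  have hgl1 : tmp.getLast hne = tmp[tmp.length - 1]'(by omega) := List.getLast_eq_getElem hne
  have hgl2 : tmp.dropLast.getLast hdne = tmp[tmp.length - 2]'(by omega) := by
    rw [List.getLast_eq_getElem hdne, List.getElem_dropLast]
    exact getElem_congr rfl (by rw [List.length_dropLast]; omega) (by simp [List.length_dropLast]; omega)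
  have hne2 : (tmp.dropLast.getLast hdne).1 ≠ (tmp.getLast hne).1 := by
    intro hcontra
    have e1 : (tmp.map Prod.fst)[tmp.length - 2]'(by simp; omega) =
        (tmp.map Prod.fst)[tmp.length - 1]'(by simp; omega) := by
      rw [List.getElem_map, List.getElem_map, ← hgl1, ← hgl2, hcontra]
    have := (List.Nodup.getElem_inj_iff hfst).mp e1
    omega
  constructor
  · refine ⟨k2, hk20, hk21, ?_, ?_⟩
    · intro hcc
      apply hne2
      rw [hk2eq]; exact hcc
    · rw [hS, hk2eq]
  · intro k hk0 hk1 hkne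
    have hp : (k, PySem.List.pyGetD prev k 0) ∈ tmp :=
      hperm.mem_iff.mpr (mem_aPairs.mpr ⟨k, hk0, hk1, rfl⟩)
    have hnotlast : (k, PySem.List.pyGetD prev k 0) ≠ tmp.getLast hne := by
      intro hcc
      exact hkne (by rw [← hcc])
    have hind : (k, PySem.List.pyGetD prev k 0) ∈ tmp.dropLast := by
      have hp' : (k, PySem.List.pyGetD prev k 0) ∈ tmp.dropLast ++ [tmp.getLast hne] := by
        rw [hsplit]; exact hp
      rcases List.mem_append.mp hp' with h | h
      · exact h
      · exact absurd (List.mem_singleton.mp h) hnotlast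
    rw [hS]
    exact snd_le_getLast hpwd hdne _ hind

-- membership in prev with index t sliced out
theorem mem_excl {prev : List Int} {t : Nat} {v : Int} :
    v ∈ prev.take t ++ prev.drop (t + 1) ↔
    ∃ (k : Nat) (_ : k < prev.length), k ≠ t ∧ prev[k] = v := by
  rw [List.mem_append]
  constructor
  · rintro (h | h)
    · obtain ⟨i, hi, hv⟩ := List.mem_iff_getElem.mp h
      have hi' : i < min t prev.length := by simpa using hi
      exact ⟨i, by omega, by omega, by rw [List.getElem_take] at hv; exact hv⟩
    · obtain ⟨i, hi, hv⟩ := List.mem_iff_getElem.mp h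
      have hi' : i < prev.length - (t + 1) := by simpa using hi
      refine ⟨t + 1 + i, by omega, by omega, ?_⟩
      rw [List.getElem_drop] at hv
      exact hv
  · rintro ⟨k, hk, hkt, hv⟩
    by_cases hlt : k < t
    · left
      apply List.mem_iff_getElem.mpr
      refine ⟨k, by simp; omega, ?_⟩
      rw [List.getElem_take]; exact hv
    · right
      apply List.mem_iff_getElem.mpr
      refine ⟨k - (t + 1), by simp; omega, ?_⟩
      rw [List.getElem_drop]
      have : t + 1 + (k - (t + 1)) = k := by omega
      rw [getElem_congr rfl this (by omega)]
      exact hv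

-- B's slice-based addend is the exclusion max
theorem b_addend_exclmax {prev : List Int} {j : Int} (h2 : 2 ≤ prev.length) (hj : 0 ≤ j) :
    IsExclMax prev j (bAddend prev j) := by
  have hjt : ((j.toNat : Nat) : Int) = j := Int.toNat_of_nonneg hj
  have hs1 : PySem.List.slice prev none (some j) = prev.take j.toNat :=
    PySem.List.slice_to prev hj
  have hs2 : PySem.List.slice prev (some (j + 1)) none = prev.drop (j.toNat + 1) := by
    rw [PySem.List.slice_from prev (by omega)]
    congr 1
    omega
  have hne : prev.take j.toNat ++ prev.drop (j.toNat + 1) ≠ [] := by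
    apply List.ne_nil_of_length_pos
    simp only [List.length_append, List.length_take, List.length_drop]
    omega
  cases hmax : PySem.List.max? (prev.take j.toNat ++ prev.drop (j.toNat + 1)) (fun x => x) with
  | none => exact absurd ((PySem.List.max?_eq_none_iff _ _).mp hmax) hne
  | some m =>
    have hbe : bAddend prev j = m := by
      unfold bAddend
      rw [hs1, hs2, hmax]
      rfl
    rw [hbe]
    constructor
    · obtain ⟨k, hk, hkt, hkv⟩ := mem_excl.mp (PySem.List.max?_mem hmax)
      refine ⟨(k : Int), by omega, by exact_mod_cast hk, by omega, ?_⟩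
      rw [PySem.List.pyGetD_eq_getElem prev 0 (by omega) (by exact_mod_cast hk)]
      simpa using hkv
    · intro k hk0 hk1 hkne
      have hkn : k.toNat < prev.length := by omega
      have hmem : prev[k.toNat] ∈ prev.take j.toNat ++ prev.drop (j.toNat + 1) :=
        mem_excl.mpr ⟨k.toNat, hkn, by omega, rfl⟩
      have := PySem.List.max?_isMax hmax _ hmem
      rw [PySem.List.pyGetD_eq_getElem prev 0 hk0 hk1]
      simpa using this

-- the two per-column addends coincide
theorem addend_eq {prev : List Int} (h2 : 2 ≤ prev.length)
    (tmp : List (Int × Int)) (htmp : tmp = PySem.List.sorted (aPairs prev) (fun x => x.2))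
    (j : Int) (hj : 0 ≤ j) :
    (if j = (PySem.List.pyGetD tmp (-1) (0, 0)).1 then (PySem.List.pyGetD tmp (-2) (0, 0)).2
     else (PySem.List.pyGetD tmp (-1) (0, 0)).2) = bAddend prev j := by
  have hne : tmp ≠ [] := by
    apply List.ne_nil_of_length_pos
    rw [htmp, PySem.List.length_sorted, length_aPairs]; omega
  rw [PySem.List.pyGetD_neg_one tmp (0, 0) hne]
  obtain ⟨ha0, ha1, ha2, ha3⟩ := a_last_max h2 tmp htmp hne
  have hb := b_addend_exclmax (prev := prev) (j := j) h2 hj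
  by_cases hjL : j = (tmp.getLast hne).1
  · rw [if_pos hjL]
    exact isExclMax_unique (hjL ▸ a_second_exclmax h2 tmp htmp hne) hb
  · rw [if_neg hjL]
    refine isExclMax_unique (v := (tmp.getLast hne).2) ?_ hb
    exact ⟨⟨(tmp.getLast hne).1, ha0, ha1, fun hcc => hjL hcc.symm, ha2⟩,
      fun k hk0 hk1 _ => ha3 k hk0 hk1⟩

theorem step_eq {L : List (List Int)} {i : Int}
    (h2 : 2 ≤ (PySem.List.pyGetD L (i - 1) []).length) : aStep L i = bStep L i := by
  simp only [aStep, bStep]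
  congr 1
  apply List.foldl_ext
  intro r j hj
  have hj0 : 0 ≤ j := (PySem.List.mem_pyRange_one.mp hj).1
  rw [← apply_ite (fun v => PySem.List.pySetD r j (PySem.List.pyGetD r j 0 + v)),
    addend_eq h2 _ rfl j hj0]

theorem foldl_pySetD_length (js : List Int) (f : List Int → Int → Int) :
    ∀ r : List Int,
      (js.foldl (fun r j => PySem.List.pySetD r j (f r j)) r).length = r.length := by
  induction js with
  | nil => intro r; rfl
  | cons j js' ih =>
    intro r
    simp only [List.foldl_cons]
    exact (ih _).trans (PySem.List.length_pySetD ..)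

theorem pySetD_map_len (L : List (List Int)) {i : Int} (row : List Int) (h0 : 0 ≤ i)
    (hrow : row.length = (PySem.List.pyGetD L i []).length) :
    (PySem.List.pySetD L i row).map List.length = L.map List.length := by
  rw [PySem.List.pySetD_of_nonneg _ _ h0]
  by_cases hn : i.toNat < L.length
  · rw [List.map_set]
    have hi : row.length = L[i.toNat].length := by
      rw [hrow, PySem.List.pyGetD_eq_getElem L [] h0 (by omega)]
    rw [hi]
    have := List.set_getElem_self (as := L.map List.length) (i := i.toNat)
      (by simpa using hn)
    simpa using this
  · rw [List.set_eq_of_length_le (by omega)]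

theorem bStep_lengths (L : List (List Int)) {i : Int} (h0 : 0 ≤ i) :
    (bStep L i).map List.length = L.map List.length := by
  unfold bStep
  apply pySetD_map_len L _ h0
  exact foldl_pySetD_length _ _ _

theorem len_pyGetD_of_map_len {L M : List (List Int)}
    (h : L.map List.length = M.map List.length) (j : Int) :
    (PySem.List.pyGetD L j []).length = (PySem.List.pyGetD M j []).length := by
  have hL := PySem.List.pyGetD_map List.length L j []
  have hM := PySem.List.pyGetD_map List.length M j []
  simp only [List.length_nil] at hL hM
  rw [← hL, ← hM, h]

theorem fold_eq (land : List (List Int)) :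
    ∀ (is : List Int) (L : List (List Int)),
      (∀ i ∈ is, 0 ≤ i ∧ 2 ≤ (PySem.List.pyGetD land (i - 1) []).length) →
      L.map List.length = land.map List.length →
      is.foldl aStep L = is.foldl bStep L := by
  intro is
  induction is with
  | nil => intro L _ _; rfl
  | cons i is' ih =>
    intro L hmem hlen
    have h2 : 2 ≤ (PySem.List.pyGetD L (i - 1) []).length := by
      rw [len_pyGetD_of_map_len hlen (i - 1)]
      exact (hmem i (List.mem_cons_self ..)).2
    simp only [List.foldl_cons]
    rw [step_eq h2]
    exact ih (bStep L i) (fun j hj => hmem j (List.mem_cons_of_mem _ hj))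
      ((bStep_lengths L (hmem i (List.mem_cons_self ..)).1).trans hlen)

-- ===== VERDICT (by name: the statement is the Claim_ definition above) =====
theorem solution_spec : Claim_equal_solution := by
  unfold Claim_equal_solution
  intro land _ hpre
  unfold Spec_solution solution solution_alt
  obtain ⟨-, -, hrows⟩ := hpre
  have hfold : (PySem.List.pyRange 1 land.length 1).foldl aStep land =
      (PySem.List.pyRange 1 land.length 1).foldl bStep land := by
    apply fold_eq land
    · intro i hi
      rw [PySem.List.mem_pyRange_one] at hi
      refine ⟨by omega, ?_⟩
      have h1 : (0 : Int) ≤ i - 1 := by omega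
      rw [PySem.List.pyGetD_of_nonneg _ _ h1]
      have ht : (i - 1).toNat = i.toNat - 1 := by omega
      rw [ht]
      exact (hrows i.toNat (by omega) (by omega)).1
    · rfl
  rw [hfold]
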